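-- pv_equiv track=rewrite | github.com/whoisrobinjha/LeetCode-Solutions | Search/1351-CountNegativeNumbers.py | first_negative
-- ===== SOURCE A (Python) =====
-- def first_negative(grid):
--     start = 0
--     end = len(grid) - 1
--     fNegative = len(grid)
--     while start <= end:
--         mid = (start + end) >> 1
--         if grid[mid] < 0:
--             fNegative = mid
--             end = mid - 1
--         else:
--             start = mid + 1
--     return fNegative
-- ===== SOURCE B (Python) =====
-- def first_negative(grid):
--     for i, v in enumerate(grid):
--         if v < 0:
--             return i
--     return len(grid)
-- ===== Notes on version B (the rewrite author's own statement) =====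
-- stated objective: simpler
-- what changed: Replaces the hand-written binary search (start/end/mid loop with a sentinel) by a single linear scan over enumerate(grid) returning the first index with a negative value, len(grid) if none; Pre_ keeps only inputs whose negatives form a suffix (every descending-sorted row), since elsewhere A's binary-search value is an accident of its probe order.
-- outside the precondition, e.g. on first_negative([-1, 5, 5]): A returns 3, B returns 0
import Mathlib
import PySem

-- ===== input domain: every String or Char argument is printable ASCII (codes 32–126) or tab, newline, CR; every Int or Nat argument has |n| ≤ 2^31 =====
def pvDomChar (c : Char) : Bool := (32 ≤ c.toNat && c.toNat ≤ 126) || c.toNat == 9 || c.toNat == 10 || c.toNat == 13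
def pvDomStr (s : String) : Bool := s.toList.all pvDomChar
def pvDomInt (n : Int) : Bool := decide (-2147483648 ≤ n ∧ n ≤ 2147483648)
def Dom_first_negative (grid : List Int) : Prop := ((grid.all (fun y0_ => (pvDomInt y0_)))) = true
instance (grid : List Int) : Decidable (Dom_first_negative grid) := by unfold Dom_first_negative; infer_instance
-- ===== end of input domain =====

-- B replaces A's hand-written binary search by a plain linear scan for the first
-- negative value (simpler, not faster); equal on descending-sorted input (Pre_).

-- ===== PORT A =====
-- the while loop of A, state (start, end, fNegative); grid[mid] via pyGet?
-- (the none branch is unreachable for the call first_negative makes: 0 ≤ mid < len there)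
def firstNegLoop (grid : List Int) (start e fNeg : Int) : Int :=
  if h : start ≤ e then
    let mid := PySem.Int.floordiv (start + e) 2
    match PySem.List.pyGet? grid mid with
    | some v =>
      if v < 0 then firstNegLoop grid start (mid - 1) mid
      else firstNegLoop grid (mid + 1) e fNeg
    | none => fNeg
  else fNeg
termination_by (e + 1 - start).toNat
decreasing_by
  · have hb := PySem.Int.floordiv_two_mid_bounds h
    omega
  · have hb := PySem.Int.floordiv_two_mid_bounds h
    omega

def first_negative (grid : List Int) : Int :=
  firstNegLoop grid 0 ((grid.length : Int) - 1) (grid.length : Int)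

-- ===== PORT B =====
-- for i, v in enumerate(grid): if v < 0: return i; at the end i = len(grid)
def firstNegGo (i : Int) : List Int → Int
  | [] => i
  | v :: t => if v < 0 then i else firstNegGo (i + 1) t

def first_negative_alt (grid : List Int) : Int :=
  firstNegGo 0 grid

-- ===== PRECONDITION & SPEC =====
-- Pre_ requires the negatives to form a suffix (true of every descending-sorted row,
-- the input LeetCode 1351 guarantees): where a non-negative follows a negative, A's
-- binary search still returns a value, but which one is an accident of its probe
-- order, not a first-negative index.
def Pre_first_negative (grid : List Int) : Prop :=
  List.Pairwise (fun a b => a < 0 → b < 0) grid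
instance (grid : List Int) : Decidable (Pre_first_negative grid) := by
  unfold Pre_first_negative; infer_instance

def pvWitness_first_negative : List Int := [5, 3, 0, -1, -2]

def Spec_first_negative (grid : List Int) (out : Int) : Prop := out = first_negative_alt grid
instance (grid : List Int) (out : Int) : Decidable (Spec_first_negative grid out) := by unfold Spec_first_negative; infer_instance

-- ===== CLAIM (what is proved, stated in full; the proofs are below) =====
def Claim_equal_first_negative : Prop := ∀ (grid : List Int), Dom_first_negative grid → Pre_first_negative grid → Spec_first_negative grid (first_negative grid)

-- ===== LEMMAS AND PROOFS =====

lemma firstNegGo_eq_findIdx (l : List Int) : ∀ i : Int,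
    firstNegGo i l = i + (l.findIdx (fun v => decide (v < 0)) : Int) := by
  induction l with
  | nil => intro i; simp [firstNegGo]
  | cons v t ih =>
    intro i
    by_cases hv : v < 0 <;> simp [firstNegGo, List.findIdx_cons, hv, ih] <;> ring

lemma alt_eq_findIdx (grid : List Int) :
    first_negative_alt grid = (grid.findIdx (fun v => decide (v < 0)) : Int) := by
  simpa using firstNegGo_eq_findIdx grid 0

-- on a non-increasing list, grid[k] < 0 iff k is at or past the first negative index
lemma neg_iff_findIdx_le (grid : List Int)
    (hs : List.Pairwise (fun a b => a < 0 → b < 0) grid)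
    (k : Nat) (hk : k < grid.length) :
    grid[k] < 0 ↔ grid.findIdx (fun v => decide (v < 0)) ≤ k := by
  constructor
  · intro hneg
    by_contra hlt
    have h2 := List.not_of_lt_findIdx (p := fun v => decide (v < 0)) (xs := grid)
      (i := k) (by omega)
    simp at h2
    omega
  · intro hle
    have hN : grid.findIdx (fun v => decide (v < 0)) < grid.length := by omega
    have hpN := List.findIdx_getElem (p := fun v => decide (v < 0)) (w := hN)
    simp at hpN
    rcases Nat.eq_or_lt_of_le hle with heq | hlt
    · simpa [← heq] using hpN
    · exact (List.pairwise_iff_getElem.mp hs) _ k hN hk hlt hpN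

lemma loop_eq (grid : List Int)
    (hs : List.Pairwise (fun a b => a < 0 → b < 0) grid) :
    ∀ (start e fNeg : Int), 0 ≤ start → e < (grid.length : Int) →
    start ≤ (grid.findIdx (fun v => decide (v < 0)) : Int) →
    ((grid.findIdx (fun v => decide (v < 0)) : Int) ≤ e ∨
      fNeg = (grid.findIdx (fun v => decide (v < 0)) : Int)) →
    firstNegLoop grid start e fNeg = (grid.findIdx (fun v => decide (v < 0)) : Int) := by
  intro start e fNeg
  induction hm : (e + 1 - start).toNat using Nat.strong_induction_on generalizing start e fNeg with
  | _ n ih =>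
  intro h0 hlen hsN hinv
  rw [firstNegLoop]
  split
  · rename_i hse
    have hb := PySem.Int.floordiv_two_mid_bounds hse
    have hmid0 : 0 ≤ PySem.Int.floordiv (start + e) 2 := by omega
    have hmidlt : PySem.Int.floordiv (start + e) 2 < (grid.length : Int) := by omega
    have hget := PySem.List.pyGet?_eq_some_getElem (xs := grid)
      (i := PySem.Int.floordiv (start + e) 2) hmid0 hmidlt
    simp only [hget]
    set mid := PySem.Int.floordiv (start + e) 2 with hmid
    have hkey := neg_iff_findIdx_le grid hs mid.toNat (by omega)
    split_ifs with hneg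
    · have hNle : (grid.findIdx (fun v => decide (v < 0)) : Int) ≤ mid := by
        have := hkey.mp hneg
        omega
      exact ih ((mid - 1) + 1 - start).toNat (by omega) start (mid - 1) mid rfl
        (by omega) (by omega) hsN (by omega)
    · have hNgt : mid < (grid.findIdx (fun v => decide (v < 0)) : Int) := by
        by_contra hc
        exact hneg (hkey.mpr (by omega))
      exact ih (e + 1 - (mid + 1)).toNat (by omega) (mid + 1) e fNeg rfl
        (by omega) hlen (by omega) (by omega)
  · rename_i hse
    omega

-- ===== VERDICT (by name: the statement is the Claim_ definition above) =====
theorem first_negative_spec : Claim_equal_first_negative := by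
  intro grid _ hpre
  unfold Spec_first_negative first_negative
  rw [alt_eq_findIdx]
  have hNle : grid.findIdx (fun v => decide (v < 0)) ≤ grid.length :=
    List.findIdx_le_length
  exact loop_eq grid hpre 0 ((grid.length : Int) - 1) (grid.length : Int)
    le_rfl (by omega) (by omega) (by omega)
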